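-- pv_equiv track=rewrite | github.com/Zi-Ling/failcore | failcore/core/guards/dlp/sanitizer.py | _path_matches
-- ===== SOURCE A (Python) =====
-- from typing import Any, Dict, List, Optional, Set, Tuple
--
-- def _path_matches(path: str, target_paths: List[str]) -> bool:
--     """Check if path matches any target path (supports wildcards)"""
--     for target in target_paths:
--         # Exact match
--         if path == target:
--             return True
--
--         # Prefix match (e.g., "user.*" matches "user.email")
--         if target.endswith(".*"):
--             prefix = target[:-2]
--             if path.startswith(prefix + "."):
--                 return True
--
--         # Wildcard match (e.g., "*.email" matches "user.email")
--         if target.startswith("*."):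
--             suffix = target[2:]
--             if path.endswith("." + suffix) or path == suffix:
--                 return True
--
--     return False
-- ===== SOURCE B (Python) =====
-- def _path_matches(path, target_paths):
--     """Check if path matches any target path (supports wildcards)"""
--     # Build an index in one pass: exact targets, '.*' prefixes, '*.' suffixes
--     exact = set()
--     prefixes = []
--     suffixes = []
--     for target in target_paths:
--         exact.add(target)
--         if target.endswith(".*"):
--             prefixes.append(target[:-2])
--         if target.startswith("*."):
--             suffixes.append(target[2:])
--     if path in exact:
--         return True
--     if any(path.startswith(p + ".") for p in prefixes):
--         return True
--     return any(path.endswith("." + s) or path == s for s in suffixes)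
-- ===== Notes on version B (the rewrite author's own statement) =====
-- stated objective: alternative
-- what changed: B partitions the targets in one pass into an exact-match set, a list of '.*' prefixes and a list of '*.' suffixes, then answers by a set-membership test plus separate prefix/suffix scans, instead of A's single interleaved per-target loop with early returns.
import Mathlib
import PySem

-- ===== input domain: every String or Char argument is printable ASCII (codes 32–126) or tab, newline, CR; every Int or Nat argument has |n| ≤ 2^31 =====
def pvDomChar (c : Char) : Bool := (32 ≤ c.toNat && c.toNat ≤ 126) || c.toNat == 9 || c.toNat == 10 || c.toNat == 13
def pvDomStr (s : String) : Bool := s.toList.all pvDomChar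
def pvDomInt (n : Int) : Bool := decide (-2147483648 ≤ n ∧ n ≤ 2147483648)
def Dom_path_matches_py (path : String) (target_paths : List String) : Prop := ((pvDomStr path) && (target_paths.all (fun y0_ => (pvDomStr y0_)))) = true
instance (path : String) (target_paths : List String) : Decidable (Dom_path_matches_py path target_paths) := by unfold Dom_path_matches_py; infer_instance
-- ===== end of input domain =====

-- B builds an index (exact-match set, '.*' prefixes, '*.' suffixes) in one pass and then
-- answers by membership plus separate prefix/suffix scans; alternative decomposition, same cost.

-- ===== PORT A =====
-- A's loop over targets with early returns, on the List Char side (strings enter via toList).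
def pvALoop (p : List Char) : List (List Char) → Bool
  | [] => false
  | t :: rest =>
    if p = t then
      true
    else if PySem.Chars.endswith t ['.', '*'] &&
            PySem.Chars.startswith p (PySem.List.slice t none (some (-2)) ++ ['.']) then
      true
    else if PySem.Chars.startswith t ['*', '.'] &&
            (PySem.Chars.endswith p ('.' :: PySem.List.slice t (some 2) none) ||
             decide (p = PySem.List.slice t (some 2) none)) then
      true
    else
      pvALoop p rest

def path_matches_py (path : String) (target_paths : List String) : Bool :=
  pvALoop path.toList (target_paths.map (fun t => t.toList))

-- ===== PORT B =====
-- One pass building (exact set, prefixes, suffixes) …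
def pvBIndex (ts : List (List Char)) :
    PySem.Set (List Char) × List (List Char) × List (List Char) :=
  ts.foldl
    (fun acc t =>
      (PySem.Set.add acc.1 t,
       (if PySem.Chars.endswith t ['.', '*'] then
          acc.2.1 ++ [PySem.List.slice t none (some (-2))] else acc.2.1),
       (if PySem.Chars.startswith t ['*', '.'] then
          acc.2.2 ++ [PySem.List.slice t (some 2) none] else acc.2.2)))
    (PySem.Set.empty, [], [])

-- … then membership / prefix scan / suffix scan.
def pvBCheck (p : List Char)
    (idx : PySem.Set (List Char) × List (List Char) × List (List Char)) : Bool :=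
  if PySem.Set.contains idx.1 p then true
  else if idx.2.1.any (fun pre => PySem.Chars.startswith p (pre ++ ['.'])) then true
  else idx.2.2.any (fun suf =>
    PySem.Chars.endswith p ('.' :: suf) || decide (p = suf))

def path_matches_py_alt (path : String) (target_paths : List String) : Bool :=
  pvBCheck path.toList (pvBIndex (target_paths.map (fun t => t.toList)))

-- ===== PRECONDITION & SPEC =====
def Spec_path_matches_py (path : String) (target_paths : List String) (out : Bool) : Prop := out = path_matches_py_alt path target_paths
instance (path : String) (target_paths : List String) (out : Bool) : Decidable (Spec_path_matches_py path target_paths out) := by unfold Spec_path_matches_py; infer_instance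

-- ===== CLAIM (what is proved, stated in full; the proofs are below) =====
def Claim_equal_path_matches_py : Prop := ∀ (path : String) (target_paths : List String), Dom_path_matches_py path target_paths → Spec_path_matches_py path target_paths (path_matches_py path target_paths)

-- ===== LEMMAS AND PROOFS =====

-- pvBCheck is a disjunction of three scans over the index components.
lemma pvBCheck_eq (p : List Char)
    (idx : PySem.Set (List Char) × List (List Char) × List (List Char)) :
    pvBCheck p idx =
      (PySem.Set.contains idx.1 p ||
       idx.2.1.any (fun pre => PySem.Chars.startswith p (pre ++ ['.'])) ||
       idx.2.2.any (fun suf =>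
         PySem.Chars.endswith p ('.' :: suf) || decide (p = suf))) := by
  unfold pvBCheck
  split_ifs with h1 h2 <;> simp_all

-- One step of A's loop as a disjunction: per-target predicate, then the rest.
def pvPredA (p t : List Char) : Bool :=
  decide (p = t) ||
  (PySem.Chars.endswith t ['.', '*'] &&
   PySem.Chars.startswith p (PySem.List.slice t none (some (-2)) ++ ['.'])) ||
  (PySem.Chars.startswith t ['*', '.'] &&
   (PySem.Chars.endswith p ('.' :: PySem.List.slice t (some 2) none) ||
    decide (p = PySem.List.slice t (some 2) none)))

lemma pvALoop_cons (p t : List Char) (rest : List (List Char)) :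
    pvALoop p (t :: rest) = (pvPredA p t || pvALoop p rest) := by
  conv_lhs => rw [pvALoop]
  unfold pvPredA
  split_ifs with h1 h2 h3 <;> simp_all

-- Set.add adds membership of the new element to the contains test.
lemma pvContains_add (e : PySem.Set (List Char)) (t p : List Char) :
    PySem.Set.contains (PySem.Set.add e t) p =
      (PySem.Set.contains e p || decide (p = t)) := by
  simp [PySem.Set.mem_add]

-- Checking the index built from (acc extended by ts) = checking acc, OR A's loop over ts.
lemma pvBCheck_foldl (p : List Char) (ts : List (List Char))
    (acc : PySem.Set (List Char) × List (List Char) × List (List Char)) :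
    pvBCheck p (ts.foldl
      (fun acc t =>
        (PySem.Set.add acc.1 t,
         (if PySem.Chars.endswith t ['.', '*'] then
            acc.2.1 ++ [PySem.List.slice t none (some (-2))] else acc.2.1),
         (if PySem.Chars.startswith t ['*', '.'] then
            acc.2.2 ++ [PySem.List.slice t (some 2) none] else acc.2.2))) acc) =
    (pvBCheck p acc || pvALoop p ts) := by
  induction ts generalizing acc with
  | nil => simp [pvALoop]
  | cons t rest ih =>
    obtain ⟨e, ps, ss⟩ := acc
    rw [List.foldl_cons, ih, pvALoop_cons, pvBCheck_eq, pvBCheck_eq]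
    simp only [pvContains_add, pvPredA]
    by_cases he : PySem.Chars.endswith t ['.', '*'] = true <;>
      by_cases hs : PySem.Chars.startswith t ['*', '.'] = true <;>
      simp [he, hs, List.any_append, Bool.or_assoc, Bool.or_comm, Bool.or_left_comm]

-- ===== VERDICT (by name: the statement is the Claim_ definition above) =====
theorem path_matches_py_spec : Claim_equal_path_matches_py := by
  intro path target_paths _
  unfold Spec_path_matches_py path_matches_py path_matches_py_alt pvBIndex
  rw [pvBCheck_foldl]
  simp [pvBCheck, PySem.Set.empty]
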